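-- pv_equiv track=rewrite | github.com/sahiti3636/NLP_FINAL_PROJECT | tests_and_fixes/test_step4.py | group_srl_spans
-- ===== SOURCE A (Python) =====
-- from collections import defaultdict
--
-- def group_srl_spans(tokens, srl_labels):
--     """
--     FIX — ISSUE 1 (display) + ISSUE 2 (grouping):
--       Merges consecutive tokens sharing the same SRL role into a
--       single span string, then associates each span with its
--       nearest preceding verb using position-based scoping.
--
--     Previous version printed one line per token
--     (e.g. four ARGM-DIR lines instead of one phrase).
--     """
--     verb_positions = [i for i, r in enumerate(srl_labels) if r == "V"]
--
--     def owning_verb_idx(tok_idx):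
--         owner = None
--         for vp in verb_positions:
--             if vp <= tok_idx:
--                 owner = vp
--             else:
--                 break
--         return owner
--
--     verb_token_at = {vp: tokens[vp] for vp in verb_positions}
--     verb_args     = defaultdict(list)
--
--     i = 0
--     while i < len(tokens):
--         role = srl_labels[i]
--         if role in ("O", "V", "<PAD>", "<UNK>"):
--             i += 1
--             continue
--
--         # Collect all consecutive tokens with the same role
--         span_tokens = [tokens[i]]
--         j = i + 1
--         while j < len(tokens) and srl_labels[j] == role:
--             span_tokens.append(tokens[j])
--             j += 1
--
--         owner_pos = owning_verb_idx(i)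
--         if owner_pos is not None:
--             verb_str = verb_token_at[owner_pos]
--             verb_args[verb_str].append((role, " ".join(span_tokens)))
--
--         i = j
--
--     return verb_args
-- ===== SOURCE B (Python) =====
-- def group_srl_spans(tokens, srl_labels):
--     """
--     One left-to-right sweep: track the nearest verb seen so far and the
--     previous role; start a new span on a role change, extend the open span
--     otherwise.  No verb-position list, no inner scans.
--     """
--     result = {}
--     current_verb = None
--     prev_role = None
--     for tok, role in zip(tokens, srl_labels):
--         if role == "V":
--             current_verb = tok
--             prev_role = None
--         elif role in ("O", "<PAD>", "<UNK>"):
--             prev_role = None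
--         else:
--             if current_verb is None:
--                 pass  # span has no preceding verb: dropped
--             elif role == prev_role:
--                 spans = result[current_verb]
--                 r, s = spans[-1]
--                 spans[-1] = (r, s + " " + tok)
--             else:
--                 result.setdefault(current_verb, []).append((role, tok))
--             prev_role = role
--     return result
-- ===== Notes on version B (the rewrite author's own statement) =====
-- stated objective: faster
-- what changed: B replaces A's per-span rescan of the verb-position list (and the precomputed verb maps) by a single left-to-right sweep over zip(tokens, srl_labels) that tracks the nearest verb and the previous role, starting a new span on a role change and extending the open span in place otherwise.
import Mathlib
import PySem

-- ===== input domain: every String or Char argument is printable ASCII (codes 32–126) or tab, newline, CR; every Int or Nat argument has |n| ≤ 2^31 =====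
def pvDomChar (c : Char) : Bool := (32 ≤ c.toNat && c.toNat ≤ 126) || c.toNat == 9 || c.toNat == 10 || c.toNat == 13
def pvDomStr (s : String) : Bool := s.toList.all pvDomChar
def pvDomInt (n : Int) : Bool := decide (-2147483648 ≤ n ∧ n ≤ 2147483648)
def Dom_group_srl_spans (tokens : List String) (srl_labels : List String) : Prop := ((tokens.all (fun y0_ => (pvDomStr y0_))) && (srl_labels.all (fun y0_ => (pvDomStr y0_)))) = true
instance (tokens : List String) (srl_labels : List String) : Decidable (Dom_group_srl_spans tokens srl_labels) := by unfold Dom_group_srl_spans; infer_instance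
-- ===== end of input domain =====

-- B replaces A's per-span rescan of the verb-position list by one left-to-right
-- sweep tracking the nearest verb and the previous role (objective: faster).
-- A mutates nothing; equivalence is about the returned dict (as an assoc list).

-- ===== PORT A =====
-- owning_verb_idx's loop over verb_positions (with its break), owner accumulator
def pvOwningLoop : List Nat → Nat → Option Nat → Option Nat
  | [], _, owner => owner
  | vp :: rest, tokIdx, owner =>
      if vp ≤ tokIdx then pvOwningLoop rest tokIdx (some vp) else owner

-- [i for i, r in enumerate(srl_labels) if r == "V"]  (indices kept when the label is "V")
def pvVerbPositions (srl_labels : List String) : List Nat :=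
  (List.range srl_labels.length).filter (fun p => srl_labels.getD p "" == "V")

-- inner while loop: collect the consecutive tokens sharing `role`, returning (span_tokens, j).
-- srl_labels[j] / tokens[j] are ported as getD _ "" — exact for the in-range accesses Pre_ admits.
def pvCollectRun (tokens srl_labels : List String) (role : String) (j : Nat)
    (acc : List String) : List String × Nat :=
  if _h : j < tokens.length ∧ srl_labels.getD j "" = role then
    pvCollectRun tokens srl_labels role (j + 1) (acc ++ [tokens.getD j ""])
  else (acc, j)
termination_by tokens.length - j
decreasing_by omega

theorem pvCollectRun_ge (tokens srl_labels : List String) (role : String) :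
    ∀ j acc, j ≤ (pvCollectRun tokens srl_labels role j acc).2 := by
  intro j acc
  induction j, acc using pvCollectRun.induct (tokens := tokens) (srl_labels := srl_labels) (role := role) with
  | case1 j acc h ih =>
      rw [pvCollectRun, dif_pos h]; omega
  | case2 j acc h =>
      rw [pvCollectRun, dif_neg h]

-- outer while loop over i
def pvALoop (tokens srl_labels : List String) (vta : PySem.Dict Nat String) (i : Nat)
    (d : PySem.Dict String (List (List String))) : PySem.Dict String (List (List String)) :=
  if h : i < tokens.length then
    let role := srl_labels.getD i ""
    if role = "O" ∨ role = "V" ∨ role = "<PAD>" ∨ role = "<UNK>" then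
      pvALoop tokens srl_labels vta (i + 1) d
    else
      let sc := pvCollectRun tokens srl_labels role (i + 1) [tokens.getD i ""]
      let d' := match pvOwningLoop (pvVerbPositions srl_labels) i none with
        | none => d
        | some op =>
            let vstr := (vta.get? op).getD ""
            d.insert vstr (d.getD vstr [] ++ [[role, PySem.Str.join " " sc.1]])
      pvALoop tokens srl_labels vta sc.2 d'
  else d
termination_by tokens.length - i
decreasing_by
  · omega
  · have := pvCollectRun_ge tokens srl_labels (srl_labels.getD i "") (i + 1) [tokens.getD i ""]
    omega

def group_srl_spans (tokens : List String) (srl_labels : List String) :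
    List (String × List (List String)) :=
  let vta := (pvVerbPositions srl_labels).foldl
      (fun d vp => d.insert vp (tokens.getD vp "")) PySem.Dict.empty
  (pvALoop tokens srl_labels vta 0 PySem.Dict.empty).items

-- ===== PORT B =====
-- one step of B's sweep; state = (result dict, current_verb, prev_role); tuples (role, span) are 2-element lists
def pvBStep (st : PySem.Dict String (List (List String)) × Option String × Option String)
    (p : String × String) : PySem.Dict String (List (List String)) × Option String × Option String :=
  match st, p with
  | (d, cv, pr), (tok, role) =>
    if role = "V" then (d, some tok, none)
    else if role = "O" ∨ role = "<PAD>" ∨ role = "<UNK>" then (d, cv, none)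
    else
      match cv with
      | none => (d, none, some role)          -- span with no preceding verb: dropped
      | some v =>
          if pr = some role then              -- extend the open span in place
            let spans := d.getD v []
            let spans' := match spans.getLast? with
              | some last =>
                  spans.dropLast ++ [match last with
                    | [r, s] => [r, s ++ " " ++ tok]
                    | l => l]
              | none => spans
            (d.insert v spans', some v, some role)
          else                                -- start a new span under the current verb
            (d.insert v (d.getD v [] ++ [[role, tok]]), some v, some role)

def group_srl_spans_alt (tokens : List String) (srl_labels : List String) :
    List (String × List (List String)) :=
  (((tokens.zip srl_labels).foldl pvBStep (PySem.Dict.empty, none, none)).1).items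

-- ===== PRECONDITION & SPEC =====
-- Pre_ holds exactly where Python A returns: A indexes srl_labels[i] for every i < len(tokens)
-- and tokens[vp] for every position vp of a "V" label, and raises IndexError otherwise.
def Pre_group_srl_spans (tokens : List String) (srl_labels : List String) : Prop :=
  tokens.length ≤ srl_labels.length ∧ ∀ r ∈ srl_labels.drop tokens.length, r ≠ "V"
instance (tokens : List String) (srl_labels : List String) :
    Decidable (Pre_group_srl_spans tokens srl_labels) := by
  unfold Pre_group_srl_spans; infer_instance

def pvWitness_group_srl_spans : List String × List String :=
  (["John", "ate", "an", "apple", "today"], ["ARG0", "V", "ARG1", "ARG1", "ARGM-TMP"])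

def Spec_group_srl_spans (tokens : List String) (srl_labels : List String)
    (out : List (String × List (List String))) : Prop := out = group_srl_spans_alt tokens srl_labels
instance (tokens : List String) (srl_labels : List String)
    (out : List (String × List (List String))) :
    Decidable (Spec_group_srl_spans tokens srl_labels out) := by
  unfold Spec_group_srl_spans; infer_instance

-- ===== CLAIM (what is proved, stated in full; the proofs are below) =====
def Claim_equal_group_srl_spans : Prop := ∀ (tokens : List String) (srl_labels : List String), Dom_group_srl_spans tokens srl_labels → Pre_group_srl_spans tokens srl_labels → Spec_group_srl_spans tokens srl_labels (group_srl_spans tokens srl_labels)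

-- ===== LEMMAS AND PROOFS =====

-- proof-only helpers -------------------------------------------------------

-- "the last element seen so far" accumulator
def pvLastAcc (l : List Nat) (o : Option Nat) : Option Nat := l.foldl (fun _ p => some p) o

-- position of the last "V" label strictly before i
def pvLastV (labels : List String) : Nat → Option Nat
  | 0 => none
  | i + 1 => if labels.getD i "" = "V" then some i else pvLastV labels i

-- the tokens of the maximal run of `role`-labelled positions starting at j
def pvRunT (tokens srl_labels : List String) (role : String) (j : Nat) : List String :=
  if _h : j < tokens.length ∧ srl_labels.getD j "" = role then
    tokens.getD j "" :: pvRunT tokens srl_labels role (j + 1)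
  else []
termination_by tokens.length - j
decreasing_by omega

theorem pvLastAcc_append (l1 l2 : List Nat) (o : Option Nat) :
    pvLastAcc (l1 ++ l2) o = pvLastAcc l2 (pvLastAcc l1 o) := by
  simp [pvLastAcc, List.foldl_append]

theorem pvOwn_filter_range' (labels : List String) (i : Nat) :
    ∀ (m k : Nat) (o : Option Nat),
      pvOwningLoop ((List.range' k m).filter (fun p => labels.getD p "" == "V")) i o
        = pvLastAcc ((List.range' k m).filter
            (fun p => labels.getD p "" == "V" && decide (p ≤ i))) o := by
  intro m
  induction m with
  | zero => intro k o; simp [pvOwningLoop, pvLastAcc]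
  | succ m ih =>
    intro k o
    rw [List.range'_succ]
    simp only [List.filter_cons]
    by_cases hv : (labels.getD k "" == "V") = true
    · by_cases hk : k ≤ i
      · rw [if_pos hv, if_pos (by simp only [hv, Bool.true_and, decide_eq_true_eq]; exact hk)]
        simp only [pvOwningLoop, if_pos hk]
        rw [ih]
        simp [pvLastAcc]
      · rw [if_pos hv, if_neg (by simp only [Bool.and_eq_true, decide_eq_true_eq, not_and]; intro _; omega)]
        have hnil : (List.range' (k + 1) m).filter
            (fun p => labels.getD p "" == "V" && decide (p ≤ i)) = [] := by
          apply List.filter_eq_nil_iff.mpr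
          intro p hp
          have := List.left_le_of_mem_range' hp
          simp only [Bool.and_eq_true, decide_eq_true_eq]
          omega
        rw [hnil]
        simp only [pvOwningLoop, if_neg hk]
        simp [pvLastAcc]
    · rw [if_neg hv, if_neg (fun hc => hv ((Bool.and_eq_true _ _).mp hc).1)]
      exact ih (k + 1) o

theorem pvLastV_eq (labels : List String) :
    ∀ i : Nat, pvLastV labels i
      = pvLastAcc ((List.range i).filter (fun p => labels.getD p "" == "V")) none := by
  intro i
  induction i with
  | zero => simp [pvLastV, pvLastAcc]
  | succ i ih =>
    rw [List.range_succ, List.filter_append, pvLastAcc_append, ← ih]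
    show (if labels.getD i "" = "V" then some i else pvLastV labels i) = _
    simp only [List.filter_cons, List.filter_nil]
    by_cases hv : labels.getD i "" = "V"
    · rw [if_pos hv, if_pos (by simp only [beq_iff_eq]; exact hv)]
      rfl
    · rw [if_neg hv, if_neg (by simp only [beq_iff_eq]; exact hv)]
      rfl

theorem pvRange_filter_le (labels : List String) (i : Nat)
    (hi : labels.getD i "" ≠ "V") :
    (List.range labels.length).filter (fun p => labels.getD p "" == "V" && decide (p ≤ i))
      = (List.range i).filter (fun p => labels.getD p "" == "V") := by
  have getDfalse : ∀ p : Nat, labels.length ≤ p → (labels.getD p "" == "V") = false := by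
    intro p hp
    rw [List.getD_eq_default labels "" hp]
    rfl
  rcases Nat.lt_or_ge i labels.length with h | h
  · have hadd : i + (labels.length - i) = labels.length := by omega
    have hsplit : List.range' 0 labels.length
        = List.range' 0 i ++ List.range' (0 + i) (labels.length - i) := by
      rw [List.range'_append_1, hadd]
    rw [List.range_eq_range' (n := labels.length), hsplit, List.filter_append]
    have hnil : (List.range' (0 + i) (labels.length - i)).filter
        (fun p => labels.getD p "" == "V" && decide (p ≤ i)) = [] := by
      apply List.filter_eq_nil_iff.mpr
      intro p hp hc
      have hle := List.left_le_of_mem_range' hp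
      have hc' := (Bool.and_eq_true _ _).mp hc
      rcases Nat.eq_or_lt_of_le hle with he | hlt
      · apply hi
        rw [(by omega : i = p)]
        exact beq_iff_eq.mp hc'.1
      · have := of_decide_eq_true hc'.2
        omega
    rw [hnil, List.append_nil, List.range_eq_range' (n := i)]
    apply List.filter_congr
    intro p hp
    have := List.mem_range'_1.mp hp
    rw [decide_eq_true (by omega : p ≤ i), Bool.and_true]
  · have h1 : (List.range labels.length).filter
        (fun p => labels.getD p "" == "V" && decide (p ≤ i))
        = (List.range labels.length).filter (fun p => labels.getD p "" == "V") := by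
      apply List.filter_congr
      intro p hp
      have := List.mem_range.mp hp
      rw [decide_eq_true (by omega : p ≤ i), Bool.and_true]
    have hadd : labels.length + (i - labels.length) = i := by omega
    have hsplit : List.range' 0 i
        = List.range' 0 labels.length
            ++ List.range' (0 + labels.length) (i - labels.length) := by
      rw [List.range'_append_1, hadd]
    have hnil : (List.range' (0 + labels.length) (i - labels.length)).filter
        (fun p => labels.getD p "" == "V") = [] := by
      apply List.filter_eq_nil_iff.mpr
      intro p hp hc
      have hle := List.left_le_of_mem_range' hp
      rw [getDfalse p (by omega)] at hc
      exact Bool.false_ne_true hc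
    rw [h1, List.range_eq_range' (n := i), hsplit, List.filter_append, hnil,
      List.append_nil, ← List.range_eq_range']

theorem pvOwn_eq_lastV (labels : List String) (i : Nat) (hi : labels.getD i "" ≠ "V") :
    pvOwningLoop (pvVerbPositions labels) i none = pvLastV labels i := by
  unfold pvVerbPositions
  rw [List.range_eq_range', pvOwn_filter_range', ← List.range_eq_range',
    pvRange_filter_le labels i hi, ← pvLastV_eq]

theorem pvLastV_mem (labels : List String) :
    ∀ i p, pvLastV labels i = some p → labels.getD p "" = "V" ∧ p < i := by
  intro i
  induction i with
  | zero => intro p h; simp [pvLastV] at h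
  | succ i ih =>
    intro p h
    by_cases hv : labels.getD i "" = "V"
    · simp only [pvLastV, if_pos hv] at h
      cases h
      exact ⟨hv, Nat.lt_succ_self i⟩
    · simp only [pvLastV, if_neg hv] at h
      have := ih p h
      exact ⟨this.1, by omega⟩

theorem pvLastV_stable (labels : List String) (a : Nat) :
    ∀ b, a ≤ b → (∀ p, a ≤ p → p < b → labels.getD p "" ≠ "V") →
      pvLastV labels b = pvLastV labels a := by
  intro b
  induction b with
  | zero => intro h _
            have ha : a = 0 := by omega
            rw [ha]
  | succ b ih =>
    intro hab hno
    rcases Nat.eq_or_lt_of_le hab with he | hlt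
    · rw [he]
    · have hb : a ≤ b := by omega
      rw [pvLastV, if_neg (hno b hb (Nat.lt_succ_self b))]
      exact ih hb (fun p hp1 hp2 => hno p hp1 (by omega))

theorem pvMem_verbPositions (labels : List String) (p : Nat)
    (hv : labels.getD p "" = "V") : p ∈ pvVerbPositions labels := by
  have hlt : p < labels.length := by
    by_contra hc
    rw [List.getD_eq_default labels "" (by omega)] at hv
    exact absurd hv (by decide)
  unfold pvVerbPositions
  rw [List.mem_filter]
  exact ⟨List.mem_range.mpr hlt, by simp only [beq_iff_eq]; exact hv⟩

theorem pvVta_get (tokens : List String) :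
    ∀ (l : List Nat) (d : PySem.Dict Nat String) (p : Nat),
      (l.foldl (fun d vp => d.insert vp (tokens.getD vp "")) d).get? p
        = if p ∈ l then some (tokens.getD p "") else d.get? p := by
  intro l
  induction l with
  | nil => intro d p; simp
  | cons a l ih =>
    intro d p
    rw [List.foldl_cons, ih]
    by_cases hm : p ∈ l
    · simp [hm]
    · by_cases hpa : p = a
      · subst hpa
        simp [hm]
      · simp [hm, hpa, PySem.Dict.get?_insert]

theorem pvCollectRun_eq (tokens srl_labels : List String) (role : String) :
    ∀ j acc, pvCollectRun tokens srl_labels role j acc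
      = (acc ++ pvRunT tokens srl_labels role j, j + (pvRunT tokens srl_labels role j).length) := by
  intro j
  induction j using pvRunT.induct (tokens := tokens) (srl_labels := srl_labels) (role := role) with
  | case1 j h ih =>
    intro acc
    rw [pvCollectRun, dif_pos h]
    conv_rhs => rw [pvRunT, dif_pos h]
    rw [ih]
    refine Prod.ext ?_ ?_
    · simp
    · simp; omega
  | case2 j h =>
    intro acc
    rw [pvCollectRun, dif_neg h, pvRunT, dif_neg h]
    simp

theorem pvRunT_roles (tokens srl_labels : List String) (role : String) :
    ∀ j p, j ≤ p → p < j + (pvRunT tokens srl_labels role j).length →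
      srl_labels.getD p "" = role := by
  intro j
  induction j using pvRunT.induct (tokens := tokens) (srl_labels := srl_labels) (role := role) with
  | case1 j h ih =>
    intro p hp1 hp2
    rw [pvRunT, dif_pos h] at hp2
    simp only [List.length_cons] at hp2
    rcases Nat.eq_or_lt_of_le hp1 with he | hlt
    · rw [← he]; exact h.2
    · exact ih p hlt (by omega)
  | case2 j h =>
    intro p hp1 hp2
    rw [pvRunT, dif_neg h] at hp2
    simp at hp2
    omega

theorem pvRunT_stop (tokens srl_labels : List String) (role : String) :
    ∀ j, ¬ (j + (pvRunT tokens srl_labels role j).length < tokens.length ∧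
      srl_labels.getD (j + (pvRunT tokens srl_labels role j).length) "" = role) := by
  intro j
  induction j using pvRunT.induct (tokens := tokens) (srl_labels := srl_labels) (role := role) with
  | case1 j h ih =>
    rw [pvRunT, dif_pos h]
    simp only [List.length_cons]
    have harith : j + ((pvRunT tokens srl_labels role (j + 1)).length + 1)
        = (j + 1) + (pvRunT tokens srl_labels role (j + 1)).length := by omega
    rw [harith]
    exact ih
  | case2 j h =>
    rw [pvRunT, dif_neg h]
    simpa using h

theorem pvFoldl_str_shift :
    ∀ (ts : List String) (x z : String),
      ts.foldl (fun a b => a ++ " " ++ b) (x ++ z)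
        = x ++ ts.foldl (fun a b => a ++ " " ++ b) z := by
  intro ts
  induction ts with
  | nil => intro x z; simp
  | cons t ts ih =>
    intro x z
    simp only [List.foldl_cons]
    have hre : (x ++ z) ++ " " ++ t = x ++ (z ++ " " ++ t) := by
      apply String.toList_inj.mp
      simp [String.toList_append]
    rw [hre, ih]

theorem pvJoin_eq_foldl :
    ∀ (ts : List String) (t0 : String),
      PySem.Str.join " " (t0 :: ts) = ts.foldl (fun a b => a ++ " " ++ b) t0 := by
  intro ts
  induction ts with
  | nil =>
    intro t0
    apply String.toList_inj.mp
    rw [PySem.Str.toList_join]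
    simp [PySem.Chars.join_singleton]
  | cons t ts ih =>
    intro t0
    apply String.toList_inj.mp
    rw [PySem.Str.toList_join]
    simp only [List.map_cons]
    rw [PySem.Chars.join_cons_cons]
    have := congrArg String.toList (ih t)
    rw [PySem.Str.toList_join] at this
    simp only [List.map_cons] at this
    rw [this]
    simp only [List.foldl_cons]
    rw [pvFoldl_str_shift ts (t0 ++ " ") t]
    simp [String.toList_append, String.append_assoc]

theorem pvZip_drop_cons (tokens labels : List String) (i : Nat)
    (hi : i < tokens.length) (hlen : tokens.length ≤ labels.length) :
    (tokens.zip labels).drop i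
      = (tokens.getD i "", labels.getD i "") :: (tokens.zip labels).drop (i + 1) := by
  have hz : i < (tokens.zip labels).length := by
    rw [List.length_zip]; omega
  rw [List.drop_eq_getElem_cons hz, List.getElem_zip,
    List.getD_eq_getElem tokens "" hi, List.getD_eq_getElem labels "" (by omega)]


-- evaluation lemmas for pvBStep ---------------------------------------------

theorem pvBStep_V (d : PySem.Dict String (List (List String))) (cv pr : Option String)
    (tok : String) : pvBStep (d, cv, pr) (tok, "V") = (d, some tok, none) := by
  simp [pvBStep]

theorem pvBStep_triv (d : PySem.Dict String (List (List String))) (cv pr : Option String)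
    (tok role : String) (h : role = "O" ∨ role = "<PAD>" ∨ role = "<UNK>")
    (hV : role ≠ "V") : pvBStep (d, cv, pr) (tok, role) = (d, cv, none) := by
  simp only [pvBStep]
  rw [if_neg hV, if_pos h]

theorem pvBStep_none (d : PySem.Dict String (List (List String))) (pr : Option String)
    (tok role : String) (hV : role ≠ "V") (hO : role ≠ "O") (hP : role ≠ "<PAD>")
    (hU : role ≠ "<UNK>") : pvBStep (d, none, pr) (tok, role) = (d, none, some role) := by
  simp only [pvBStep]
  rw [if_neg hV, if_neg (by tauto)]

theorem pvBStep_some_new (d : PySem.Dict String (List (List String))) (v : String)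
    (pr : Option String) (tok role : String) (hV : role ≠ "V") (hO : role ≠ "O")
    (hP : role ≠ "<PAD>") (hU : role ≠ "<UNK>") (hpr : pr ≠ some role) :
    pvBStep (d, some v, pr) (tok, role)
      = (d.insert v (d.getD v [] ++ [[role, tok]]), some v, some role) := by
  simp only [pvBStep]
  rw [if_neg hV, if_neg (by tauto), if_neg hpr]

theorem pvBStep_some_ext (d0 : PySem.Dict String (List (List String))) (v : String)
    (L : List (List String)) (s tok role : String) (hV : role ≠ "V") (hO : role ≠ "O")
    (hP : role ≠ "<PAD>") (hU : role ≠ "<UNK>") :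
    pvBStep (d0.insert v (L ++ [[role, s]]), some v, some role) (tok, role)
      = (d0.insert v (L ++ [[role, s ++ " " ++ tok]]), some v, some role) := by
  simp only [pvBStep]
  rw [if_neg hV, if_neg (by tauto)]
  simp only [if_true, PySem.Dict.getD_insert_self, List.getLast?_concat,
    List.dropLast_concat, PySem.Dict.insert_insert_self]

-- the sweep consumes a whole run --------------------------------------------

theorem pvRun_none (tokens labels : List String) (hlen : tokens.length ≤ labels.length)
    (role : String) (hV : role ≠ "V") (hO : role ≠ "O") (hP : role ≠ "<PAD>")
    (hU : role ≠ "<UNK>") (d : PySem.Dict String (List (List String))) :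
    ∀ j, ((tokens.zip labels).drop (j + (pvRunT tokens labels role j).length)).foldl
          pvBStep (d, none, some role)
      = ((tokens.zip labels).drop j).foldl pvBStep (d, none, some role) := by
  intro j
  induction j using pvRunT.induct (tokens := tokens) (srl_labels := labels) (role := role) with
  | case1 j h ih =>
    have harith : j + (pvRunT tokens labels role j).length
        = (j + 1) + (pvRunT tokens labels role (j + 1)).length := by
      conv_lhs => rw [pvRunT, dif_pos h]
      simp only [List.length_cons]
      omega
    rw [harith, ih, pvZip_drop_cons tokens labels j h.1 hlen, List.foldl_cons, h.2,
      pvBStep_none d (some role) _ role hV hO hP hU]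
  | case2 j h =>
    rw [pvRunT, dif_neg h]
    simp

theorem pvRun_some (tokens labels : List String) (hlen : tokens.length ≤ labels.length)
    (role : String) (hV : role ≠ "V") (hO : role ≠ "O") (hP : role ≠ "<PAD>")
    (hU : role ≠ "<UNK>") (v : String) :
    ∀ (j : Nat) (d0 : PySem.Dict String (List (List String))) (L : List (List String))
      (s : String),
      ((tokens.zip labels).drop j).foldl pvBStep
          (d0.insert v (L ++ [[role, s]]), some v, some role)
        = ((tokens.zip labels).drop (j + (pvRunT tokens labels role j).length)).foldl
            pvBStep
            (d0.insert v (L ++ [[role,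
              (pvRunT tokens labels role j).foldl (fun a b => a ++ " " ++ b) s]]),
              some v, some role) := by
  intro j
  induction j using pvRunT.induct (tokens := tokens) (srl_labels := labels) (role := role) with
  | case1 j h ih =>
    intro d0 L s
    rw [pvZip_drop_cons tokens labels j h.1 hlen, List.foldl_cons, h.2,
      pvBStep_some_ext d0 v L s _ role hV hO hP hU,
      ih d0 L (s ++ " " ++ tokens.getD j "")]
    conv_rhs => rw [pvRunT, dif_pos h]
    simp only [List.length_cons, List.foldl_cons]
    have harith : j + ((pvRunT tokens labels role (j + 1)).length + 1)
        = (j + 1) + (pvRunT tokens labels role (j + 1)).length := by omega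
    rw [harith]
  | case2 j h =>
    intro d0 L s
    rw [pvRunT, dif_neg h]
    simp

-- the main simulation invariant ---------------------------------------------

theorem pvMain (tokens labels : List String) (hlen : tokens.length ≤ labels.length) :
    ∀ (n i : Nat), tokens.length - i ≤ n →
      ∀ (d : PySem.Dict String (List (List String))) (cv pr : Option String),
        cv = (pvLastV labels i).map (fun p => tokens.getD p "") →
        (i < tokens.length → ∀ r : String, pr = some r → labels.getD i "" ≠ r) →
        pvALoop tokens labels
            ((pvVerbPositions labels).foldl
              (fun d vp => d.insert vp (tokens.getD vp "")) PySem.Dict.empty) i d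
          = (((tokens.zip labels).drop i).foldl pvBStep (d, cv, pr)).1 := by
  intro n
  induction n with
  | zero =>
    intro i hni d cv pr hcv hpr
    rw [pvALoop, dif_neg (by omega)]
    have hdrop : (tokens.zip labels).drop i = [] := by
      apply List.drop_eq_nil_of_le
      rw [List.length_zip]
      omega
    rw [hdrop]
    rfl
  | succ n ihn =>
    intro i hni d cv pr hcv hpr
    by_cases hi : i < tokens.length
    case neg =>
      rw [pvALoop, dif_neg hi]
      have hdrop : (tokens.zip labels).drop i = [] := by
        apply List.drop_eq_nil_of_le
        rw [List.length_zip]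
        omega
      rw [hdrop]
      rfl
    case pos =>
    rw [pvALoop, dif_pos hi]
    by_cases htr : labels.getD i "" = "O" ∨ labels.getD i "" = "V"
        ∨ labels.getD i "" = "<PAD>" ∨ labels.getD i "" = "<UNK>"
    · rw [if_pos htr, pvZip_drop_cons tokens labels i hi hlen, List.foldl_cons]
      by_cases hVv : labels.getD i "" = "V"
      · rw [hVv, pvBStep_V]
        apply ihn (i + 1) (by omega)
        · show some (tokens.getD i "") = _
          simp only [pvLastV, if_pos hVv, Option.map_some]
        · intro _ r hr
          cases hr
      · rw [pvBStep_triv d cv pr _ _ (by tauto) hVv]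
        apply ihn (i + 1) (by omega)
        · rw [hcv]
          congr 1
          show pvLastV labels i = pvLastV labels (i + 1)
          simp only [pvLastV, if_neg hVv]
        · intro _ r hr
          cases hr
    · rw [if_neg htr]
      have hO : labels.getD i "" ≠ "O" := by tauto
      have hVv : labels.getD i "" ≠ "V" := by tauto
      have hP : labels.getD i "" ≠ "<PAD>" := by tauto
      have hU : labels.getD i "" ≠ "<UNK>" := by tauto
      rw [pvCollectRun_eq, pvOwn_eq_lastV labels i hVv]
      have hge := pvCollectRun_ge tokens labels (labels.getD i "") (i + 1) [tokens.getD i ""]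
      rw [pvCollectRun_eq] at hge
      have hstop := pvRunT_stop tokens labels (labels.getD i "") (i + 1)
      have hroles := pvRunT_roles tokens labels (labels.getD i "") (i + 1)
      have hstable : pvLastV labels
          ((i + 1) + (pvRunT tokens labels (labels.getD i "") (i + 1)).length)
          = pvLastV labels i := by
        apply pvLastV_stable labels i _ (by omega)
        intro p hp1 hp2
        rcases Nat.eq_or_lt_of_le hp1 with he | hlt
        · rw [← he]
          exact hVv
        · rw [hroles p hlt (by omega)]
          exact hVv
      rcases hLV : pvLastV labels i with _ | p
      · -- no preceding verb: the span is dropped on both sides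
        rw [hLV] at hcv
        simp only [Option.map_none] at hcv
        subst hcv
        show pvALoop tokens labels
            ((pvVerbPositions labels).foldl
              (fun d vp => d.insert vp (tokens.getD vp "")) PySem.Dict.empty)
            (i + 1 + (pvRunT tokens labels (labels.getD i "") (i + 1)).length) d
          = (((tokens.zip labels).drop i).foldl pvBStep (d, none, pr)).1
        rw [pvZip_drop_cons tokens labels i hi hlen, List.foldl_cons,
          pvBStep_none d pr _ _ hVv hO hP hU,
          ← pvRun_none tokens labels hlen _ hVv hO hP hU d (i + 1)]
        apply ihn _ (by omega)
        · rw [hstable, hLV]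
          rfl
        · intro hjl r hr
          cases hr
          intro hrole
          exact hstop ⟨hjl, hrole⟩
      · -- owned span: one append on the A side, append + extensions on the B side
        rw [hLV] at hcv
        simp only [Option.map_some] at hcv
        have hpmem := pvLastV_mem labels i p hLV
        have hget := pvVta_get tokens (pvVerbPositions labels) PySem.Dict.empty p
        rw [if_pos (pvMem_verbPositions labels p hpmem.1)] at hget
        show pvALoop tokens labels
            ((pvVerbPositions labels).foldl
              (fun d vp => d.insert vp (tokens.getD vp "")) PySem.Dict.empty)
            (i + 1 + (pvRunT tokens labels (labels.getD i "") (i + 1)).length)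
            (d.insert
              ((((pvVerbPositions labels).foldl
                  (fun d vp => d.insert vp (tokens.getD vp "")) PySem.Dict.empty).get? p).getD "")
              (d.getD
                ((((pvVerbPositions labels).foldl
                    (fun d vp => d.insert vp (tokens.getD vp "")) PySem.Dict.empty).get? p).getD "") []
                ++ [[labels.getD i "", PySem.Str.join " "
                      ([tokens.getD i ""] ++ pvRunT tokens labels (labels.getD i "") (i + 1))]]))
          = (((tokens.zip labels).drop i).foldl pvBStep (d, cv, pr)).1
        rw [hget]
        simp only [Option.getD_some]
        have hprne : pr ≠ some (labels.getD i "") := by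
          intro hc
          exact (hpr hi (labels.getD i "") hc) rfl
        rw [pvZip_drop_cons tokens labels i hi hlen, List.foldl_cons, hcv,
          pvBStep_some_new d (tokens.getD p "") pr _ _ hVv hO hP hU hprne,
          pvRun_some tokens labels hlen _ hVv hO hP hU (tokens.getD p "") (i + 1) d
            (d.getD (tokens.getD p "") []) (tokens.getD i "")]
        have hjoin : PySem.Str.join " " ([tokens.getD i ""]
              ++ pvRunT tokens labels (labels.getD i "") (i + 1))
            = (pvRunT tokens labels (labels.getD i "") (i + 1)).foldl
                (fun a b => a ++ " " ++ b) (tokens.getD i "") := by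
          rw [List.singleton_append, pvJoin_eq_foldl]
        rw [hjoin]
        apply ihn _ (by omega)
        · rw [hstable, hLV]
          rfl
        · intro hjl r hr
          cases hr
          intro hrole
          exact hstop ⟨hjl, hrole⟩

-- ===== VERDICT (by name: the statement is the Claim_ definition above) =====
theorem group_srl_spans_spec : Claim_equal_group_srl_spans := by
  unfold Claim_equal_group_srl_spans
  intro tokens srl_labels _ hpre
  unfold Spec_group_srl_spans group_srl_spans group_srl_spans_alt
  have hmain := pvMain tokens srl_labels hpre.1 tokens.length 0 (by omega)
    PySem.Dict.empty none none (by rfl) (by intro _ r hr; cases hr)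
  rw [List.drop_zero] at hmain
  show (pvALoop tokens srl_labels
      ((pvVerbPositions srl_labels).foldl
        (fun d vp => d.insert vp (tokens.getD vp "")) PySem.Dict.empty) 0 PySem.Dict.empty).items
    = ((tokens.zip srl_labels).foldl pvBStep (PySem.Dict.empty, none, none)).1.items
  rw [hmain]
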